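-- pv_equiv track=rewrite | github.com/QUT-Motorsport/QUTMS_Driverless | src/perception/lidar_pipeline_2/lidar_pipeline_2/library/point_classifier.py | map_segments
-- ===== SOURCE A (Python) =====
-- from bisect import bisect_left
--
-- def take_closest(myList, myNumber):
--     """
--     Assumes myList is sorted. Returns closest value to myNumber.
--
--     If two numbers are equally close, return the smallest number.
--     """
--     pos = bisect_left(myList, myNumber)
--     if pos == 0:
--         return myList[0]
--     if pos == len(myList):
--         return myList[-1]
--     before = myList[pos - 1]
--     after = myList[pos]
--     if after - myNumber < myNumber - before:
--         return after
--     else: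
--         return before
--
-- def map_segments(ground_plane, SEGMENT_COUNT):
--     # Indices of segments without ground lines
--     empty_segments = [idx for idx, lines in enumerate(ground_plane) if not lines]
--
--     # Indices of segments with ground lines
--     non_empty_segments = [idx for idx, lines in enumerate(ground_plane) if lines]
--
--     # [0, 1, ..., 126, 127]
--     segments_full = list(range(SEGMENT_COUNT))
--     for empty_segment in empty_segments:
--         closest_idx = take_closest(non_empty_segments, empty_segment)
--         segments_full[empty_segment] = closest_idx
--
--     return segments_full
-- ===== SOURCE B (Python) =====
-- def map_segments(ground_plane, SEGMENT_COUNT):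
--     # Two linear passes instead of per-empty-segment binary search.
--     n = len(ground_plane)
--
--     # Forward pass: index of the nearest non-empty segment at or before i.
--     left = [None] * n
--     last = None
--     for i in range(n):
--         if ground_plane[i]:
--             last = i
--         left[i] = last
--
--     # Backward pass: index of the nearest non-empty segment at or after i.
--     right = [None] * n
--     nxt = None
--     for i in range(n - 1, -1, -1):
--         if ground_plane[i]:
--             nxt = i
--         right[i] = nxt
--
--     segments_full = list(range(SEGMENT_COUNT))
--     for i in range(n):
--         if not ground_plane[i]:
--             l = left[i]
--             r = right[i]
--             if l is None and r is None:
--                 continue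
--             if l is None:
--                 c = r
--             elif r is None:
--                 c = l
--             else:
--                 c = l if i - l <= r - i else r
--             segments_full[i] = c
--     return segments_full
-- ===== Notes on version B (the rewrite author's own statement) =====
-- stated objective: alternative
-- what changed: Replaces A's per-empty-segment binary search (bisect_left on the non-empty index list) by two linear passes that record the nearest non-empty index on the left and on the right of every position, then picks the closer one (ties toward the left/smaller index); same measured cost.
import Mathlib
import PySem

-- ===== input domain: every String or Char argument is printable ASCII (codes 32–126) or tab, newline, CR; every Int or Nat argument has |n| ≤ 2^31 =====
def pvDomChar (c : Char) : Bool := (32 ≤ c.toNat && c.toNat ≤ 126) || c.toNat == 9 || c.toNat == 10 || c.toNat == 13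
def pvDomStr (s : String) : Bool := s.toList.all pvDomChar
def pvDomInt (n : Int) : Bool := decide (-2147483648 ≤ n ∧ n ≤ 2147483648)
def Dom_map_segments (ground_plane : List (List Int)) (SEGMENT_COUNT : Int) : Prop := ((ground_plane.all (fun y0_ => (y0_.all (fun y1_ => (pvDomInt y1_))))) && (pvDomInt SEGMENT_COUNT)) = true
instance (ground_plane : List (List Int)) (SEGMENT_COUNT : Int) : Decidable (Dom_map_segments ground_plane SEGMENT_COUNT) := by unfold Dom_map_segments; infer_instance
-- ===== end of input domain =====

-- B replaces the per-empty-segment binary search (bisect) of A by two linear scans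
-- (nearest non-empty index on the left / on the right) and a choice by distance;
-- equivalence of the RETURN value is proved on Pre_ (where Python A returns normally).

-- ===== PORT A =====
-- take_closest: bisect_left is PySem.List.bisectLeft; myList[...] indexing is pyGetD
-- (the default 0 is never reached on Pre_, where myList is nonempty whenever called).
def take_closest (myList : List Int) (myNumber : Int) : Int :=
  let pos := PySem.List.bisectLeft myList myNumber
  if pos = 0 then PySem.List.pyGetD myList 0 0
  else if pos = myList.length then PySem.List.pyGetD myList (-1) 0
  else
    let before := PySem.List.pyGetD myList ((pos : Int) - 1) 0
    let after := PySem.List.pyGetD myList (pos : Int) 0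
    if after - myNumber < myNumber - before then after else before

def map_segments (ground_plane : List (List Int)) (SEGMENT_COUNT : Int) : List Int :=
  let empty_segments := ((PySem.List.enumerate ground_plane 0).filter (fun p => p.2.isEmpty)).map (fun p => p.1)
  let non_empty_segments := ((PySem.List.enumerate ground_plane 0).filter (fun p => !p.2.isEmpty)).map (fun p => p.1)
  let segments_full := PySem.List.pyRange 0 SEGMENT_COUNT 1
  empty_segments.foldl (fun acc empty_segment =>
    let closest_idx := take_closest non_empty_segments empty_segment
    PySem.List.pySetD acc empty_segment closest_idx) segments_full

-- ===== PORT B =====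
-- forward pass of Source B: left[i] = index of nearest non-empty segment at or before i
def leftScan (gp : List (List Int)) (i : Int) (last : Option Int) : List (Option Int) :=
  match gp with
  | [] => []
  | lines :: rest =>
    let last' := if lines.isEmpty then last else some i
    last' :: leftScan rest (i + 1) last'

-- backward pass of Source B: right[i] = index of nearest non-empty segment at or after i
def rightScan (gp : List (List Int)) (i : Int) : List (Option Int) :=
  match gp with
  | [] => []
  | lines :: rest =>
    let r := rightScan rest (i + 1)
    let v := if lines.isEmpty then r.headD none else some i
    v :: r

-- the choice in Source B's final loop (None/None -> continue is the `none` result)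
def chooseLR (i : Int) (l r : Option Int) : Option Int :=
  match l, r with
  | none, none => none
  | none, some rv => some rv
  | some lv, none => some lv
  | some lv, some rv => some (if i - lv ≤ rv - i then lv else rv)

def map_segments_alt (ground_plane : List (List Int)) (SEGMENT_COUNT : Int) : List Int :=
  let left := leftScan ground_plane 0 none
  let right := rightScan ground_plane 0
  let init := PySem.List.pyRange 0 SEGMENT_COUNT 1
  (PySem.List.enumerate (ground_plane.zip (left.zip right)) 0).foldl (fun acc p =>
    if p.2.1.isEmpty then
      match chooseLR p.1 p.2.2.1 p.2.2.2 with
      | none => acc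
      | some c => PySem.List.pySetD acc p.1 c
    else acc) init

-- ===== PRECONDITION & SPEC =====
-- Pre_ excludes exactly the inputs where Python A raises IndexError: an empty segment
-- with no non-empty segment at all (take_closest on []), or an empty segment whose
-- index is not below SEGMENT_COUNT (assignment past the end of segments_full).
def Pre_map_segments (ground_plane : List (List Int)) (SEGMENT_COUNT : Int) : Prop :=
  ((∃ l ∈ ground_plane, l = ([] : List Int)) → (∃ l ∈ ground_plane, l ≠ ([] : List Int))) ∧
  (∀ (j : Nat) (h : j < ground_plane.length), ground_plane[j] = ([] : List Int) → (j : Int) < SEGMENT_COUNT)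
instance (ground_plane : List (List Int)) (SEGMENT_COUNT : Int) : Decidable (Pre_map_segments ground_plane SEGMENT_COUNT) := by unfold Pre_map_segments; infer_instance

def pvWitness_map_segments : List (List Int) × Int := ([[1], [], [2, 3], []], 5)

def Spec_map_segments (ground_plane : List (List Int)) (SEGMENT_COUNT : Int) (out : List Int) : Prop := out = map_segments_alt ground_plane SEGMENT_COUNT
instance (ground_plane : List (List Int)) (SEGMENT_COUNT : Int) (out : List Int) : Decidable (Spec_map_segments ground_plane SEGMENT_COUNT out) := by unfold Spec_map_segments; infer_instance

-- ===== CLAIM (what is proved, stated in full; the proofs are below) =====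
def Claim_equal_map_segments : Prop := ∀ (ground_plane : List (List Int)) (SEGMENT_COUNT : Int), Dom_map_segments ground_plane SEGMENT_COUNT → Pre_map_segments ground_plane SEGMENT_COUNT → Spec_map_segments ground_plane SEGMENT_COUNT (map_segments ground_plane SEGMENT_COUNT)
-- ===== LEMMAS AND PROOFS =====

-- indices (offset k) of the non-empty segments, in increasing order
def neIdx (gp : List (List Int)) (k : Int) : List Int :=
  match gp with
  | [] => []
  | lines :: rest => (if lines.isEmpty then [] else [k]) ++ neIdx rest (k + 1)

-- indices (offset k) of the empty segments, in increasing order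
def emIdx (gp : List (List Int)) (k : Int) : List Int :=
  match gp with
  | [] => []
  | lines :: rest => (if lines.isEmpty then [k] else []) ++ emIdx rest (k + 1)

theorem enum_filter_ne (gp : List (List Int)) (k : Int) :
    ((PySem.List.enumerate gp k).filter (fun p => !p.2.isEmpty)).map (fun p => p.1) = neIdx gp k := by
  induction gp generalizing k with
  | nil => rfl
  | cons lines rest ih =>
    simp only [PySem.List.enumerate_cons, List.filter_cons, neIdx]
    by_cases h : lines.isEmpty <;> simp [h, ih]

theorem enum_filter_em (gp : List (List Int)) (k : Int) :
    ((PySem.List.enumerate gp k).filter (fun p => p.2.isEmpty)).map (fun p => p.1) = emIdx gp k := by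
  induction gp generalizing k with
  | nil => rfl
  | cons lines rest ih =>
    simp only [PySem.List.enumerate_cons, List.filter_cons, emIdx]
    by_cases h : lines.isEmpty <;> simp [h, ih]

theorem mem_neIdx (gp : List (List Int)) (k : Int) (x : Int) :
    x ∈ neIdx gp k ↔ ∃ (j : Nat) (h : j < gp.length), x = k + j ∧ ¬gp[j].isEmpty := by
  induction gp generalizing k with
  | nil => simp [neIdx]
  | cons lines rest ih =>
    constructor
    · intro hx
      simp only [neIdx, List.mem_append] at hx
      rcases hx with hx | hx
      · refine ⟨0, by simp, ?_⟩
        by_cases h : lines.isEmpty <;> simp [h] at hx ⊢ <;> simp [hx, h]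
      · obtain ⟨j, hj, hxe, hne⟩ := (ih (k + 1)).1 hx
        exact ⟨j + 1, by simpa using hj, by push_cast at hxe ⊢; omega, by simpa using hne⟩
    · rintro ⟨j, hj, hxe, hne⟩
      cases j with
      | zero =>
        simp only [List.getElem_cons_zero] at hne
        simp [neIdx, hne, hxe]
      | succ j =>
        simp only [neIdx, List.mem_append]
        right
        exact (ih (k + 1)).2 ⟨j, by simpa using hj, by push_cast at hxe ⊢; omega, by simpa using hne⟩

theorem neIdx_lb (gp : List (List Int)) (k : Int) : ∀ x ∈ neIdx gp k, k ≤ x := by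
  intro x hx
  obtain ⟨j, hj, hxe, -⟩ := (mem_neIdx gp k x).1 hx
  omega

theorem neIdx_pairwise (gp : List (List Int)) (k : Int) : (neIdx gp k).Pairwise (· < ·) := by
  induction gp generalizing k with
  | nil => simp [neIdx]
  | cons lines rest ih =>
    simp only [neIdx]
    apply List.pairwise_append.2
    refine ⟨?_, ih (k + 1), ?_⟩
    · by_cases h : lines.isEmpty <;> simp [h]
    · intro a ha b hb
      have := neIdx_lb rest (k + 1) b hb
      by_cases h : lines.isEmpty <;> simp [h] at ha
      omega

-- ===== characterization of the scans =====
theorem leftScan_length (gp : List (List Int)) (i : Int) (last : Option Int) :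
    (leftScan gp i last).length = gp.length := by
  induction gp generalizing i last with
  | nil => rfl
  | cons lines rest ih => simp [leftScan, ih]

theorem rightScan_length (gp : List (List Int)) (i : Int) :
    (rightScan gp i).length = gp.length := by
  induction gp generalizing i with
  | nil => rfl
  | cons lines rest ih => simp [rightScan, ih]

theorem leftScan_getElem? (gp : List (List Int)) (k : Int) (last : Option Int) (j : Nat)
    (hj : j < gp.length) :
    (leftScan gp k last)[j]? =
      some ((((neIdx gp k).filter (fun v => decide (v ≤ k + (j : Int)))).getLast?).or last) := by
  induction gp generalizing k last j with
  | nil => simp at hj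
  | cons lines rest ih =>
    simp only [leftScan, neIdx, List.filter_append, List.getLast?_append, Option.or_assoc]
    cases j with
    | zero =>
      have h0 : (neIdx rest (k+1)).filter (fun v => decide (v ≤ k + ((0:Nat):Int))) = [] := by
        apply List.filter_eq_nil_iff.2
        intro a ha
        have := neIdx_lb rest (k+1) a ha
        simp; omega
      rw [h0]
      by_cases h : lines.isEmpty <;> simp [h]
    | succ j =>
      have hj' : j < rest.length := by simpa using hj
      simp only [List.getElem?_cons_succ]
      rw [ih (k+1) (if lines.isEmpty then last else some k) j hj']
      have hkj : k + 1 + (j:Int) = k + ((j+1:Nat):Int) := by push_cast; ring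
      have harg : (fun v : Int => decide (v ≤ k + 1 + (j:Int))) = (fun v : Int => decide (v ≤ k + ((j+1:Nat):Int))) := by
        funext v; rw [hkj]
      have hhead : (((if lines.isEmpty then ([]:List Int) else [k]).filter (fun v => decide (v ≤ k + ((j+1:Nat):Int)))).getLast?).or last = (if lines.isEmpty then last else some k) := by
        by_cases h : lines.isEmpty
        · simp [h]
        · simp [h, List.filter]
          left
          simp [show ((0:Int) ≤ (j:Int) + 1) from by omega]
      rw [harg, hhead]

theorem rightScan_headD (gp : List (List Int)) (k : Int) :
    (rightScan gp k).head?.getD none = (neIdx gp k).head? := by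
  induction gp generalizing k with
  | nil => rfl
  | cons lines rest ih =>
    simp only [rightScan, neIdx]
    by_cases h : lines.isEmpty
    · simp only [h, if_true, List.head?_cons, Option.getD_some, List.headD_eq_head?_getD, ih (k+1), List.nil_append]
    · simp [h]

theorem rightScan_getElem? (gp : List (List Int)) (k : Int) (j : Nat) (hj : j < gp.length) :
    (rightScan gp k)[j]? =
      some (((neIdx gp k).filter (fun v => decide (k + (j : Int) ≤ v))).head?) := by
  induction gp generalizing k j with
  | nil => simp at hj
  | cons lines rest ih =>
    simp only [rightScan, neIdx, List.filter_append]
    cases j with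
    | zero =>
      have hfull : (neIdx rest (k+1)).filter (fun v => decide (k + ((0:Nat):Int) ≤ v)) = neIdx rest (k+1) := by
        apply List.filter_eq_self.2
        intro a ha
        have := neIdx_lb rest (k+1) a ha
        simp; omega
      rw [hfull]
      by_cases h : lines.isEmpty
      · simp only [h, if_true, List.getElem?_cons_zero, List.headD_eq_head?_getD, rightScan_headD rest (k+1)]
        simp
      · simp [h]
    | succ j =>
      have hj' : j < rest.length := by simpa using hj
      simp only [List.getElem?_cons_succ]
      rw [ih (k+1) j hj']
      have harg : (fun v : Int => decide (k + 1 + (j:Int) ≤ v)) = (fun v : Int => decide (k + ((j+1:Nat):Int) ≤ v)) := by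
        funext v
        rw [show k + 1 + (j:Int) = k + ((j+1:Nat):Int) from by push_cast; ring]
      have hhead : (if lines.isEmpty then ([]:List Int) else [k]).filter (fun v => decide (k + ((j+1:Nat):Int) ≤ v)) = [] := by
        by_cases h : lines.isEmpty
        · simp [h]
        · simp [h, List.filter]
      rw [harg, hhead]
      rfl

theorem filter_le_eq_take (ne : List Int) (e : Int) (hpw : ne.Pairwise (· < ·)) (hnm : e ∉ ne) :
    ne.filter (fun v => decide (v ≤ e)) = ne.take (PySem.List.bisectLeft ne e) ∧
    ne.filter (fun v => decide (e ≤ v)) = ne.drop (PySem.List.bisectLeft ne e) := by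
  obtain ⟨hle, hlt, hge⟩ := PySem.List.bisectLeft_spec ne e (hpw.imp le_of_lt)
  set pos := PySem.List.bisectLeft ne e with hpos
  have htk : ∀ x ∈ ne.take pos, x < e := by
    intro x hx
    obtain ⟨i, hi, hxe⟩ := List.mem_take_iff_getElem.1 hx
    have := hlt i (by omega) (by omega)
    omega
  have hdr : ∀ x ∈ ne.drop pos, e < x := by
    intro x hx
    obtain ⟨i, hi, hxe⟩ := List.mem_drop_iff_getElem.1 hx
    have h1 := hge (pos + i) (by omega) (by omega)
    have hne : x ≠ e := fun h => hnm (h ▸ List.mem_of_mem_drop hx)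
    omega
  constructor
  · conv_lhs => rw [← List.take_append_drop pos ne]
    rw [List.filter_append]
    rw [List.filter_eq_self.2 (fun a ha => by simpa using le_of_lt (htk a ha)),
        List.filter_eq_nil_iff.2 (fun a ha => by simpa using not_le.2 (hdr a ha)),
        List.append_nil]
  · conv_lhs => rw [← List.take_append_drop pos ne]
    rw [List.filter_append]
    rw [List.filter_eq_nil_iff.2 (fun a ha => by simpa using not_le.2 (htk a ha)),
        List.filter_eq_self.2 (fun a ha => by simpa using le_of_lt (hdr a ha)),
        List.nil_append]

theorem take_closest_choose (ne : List Int) (e : Int) (hpw : ne.Pairwise (· < ·))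
    (hnm : e ∉ ne) (hne : ne ≠ []) :
    chooseLR e ((ne.filter (fun v => decide (v ≤ e))).getLast?)
      ((ne.filter (fun v => decide (e ≤ v))).head?) = some (take_closest ne e) := by
  obtain ⟨hle, hlt, hge⟩ := PySem.List.bisectLeft_spec ne e (hpw.imp le_of_lt)
  obtain ⟨hf1, hf2⟩ := filter_le_eq_take ne e hpw hnm
  rw [hf1, hf2]
  set pos := PySem.List.bisectLeft ne e with hpos
  have hlen : 0 < ne.length := List.length_pos_iff.2 hne
  unfold take_closest
  rw [← hpos]
  by_cases h0 : pos = 0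
  · rw [if_pos h0, h0]
    simp only [List.take_zero, List.getLast?_nil, List.drop_zero]
    rw [PySem.List.pyGetD_zero]
    cases ne with
    | nil => exact absurd rfl hne
    | cons a t => simp [chooseLR]
  · by_cases hL : pos = ne.length
    · rw [if_neg h0, if_pos hL, hL, List.take_length, List.drop_length,
        PySem.List.pyGetD_neg_one ne 0 hne]
      simp [chooseLR, List.getLast?_eq_some_getLast hne]
    · rw [if_neg h0, if_neg hL]
      have hpos1 : 1 ≤ pos := Nat.one_le_iff_ne_zero.2 h0
      have hposlt : pos < ne.length := lt_of_le_of_ne hle hL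
      have hbefore : PySem.List.pyGetD ne ((pos:Int) - 1) 0 = ne[pos-1]'(by omega) := by
        rw [show ((pos:Int) - 1) = ((pos - 1 : Nat) : Int) from by omega, PySem.List.pyGetD_natCast]
        exact List.getD_eq_getElem ne 0 (by omega)
      have hafter : PySem.List.pyGetD ne ((pos:Int)) 0 = ne[pos]'hposlt := by
        rw [PySem.List.pyGetD_natCast]
        exact List.getD_eq_getElem ne 0 hposlt
      have htake : (List.take pos ne).getLast? = some (ne[pos-1]'(by omega)) := by
        rw [List.getLast?_eq_getElem?, List.getElem?_take, List.length_take]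
        simp only [Nat.min_eq_left (le_of_lt hposlt)]
        rw [if_pos (by omega), List.getElem?_eq_getElem (by omega)]
      have hdrop : (List.drop pos ne).head? = some (ne[pos]'hposlt) := by
        rw [List.head?_drop, List.getElem?_eq_getElem hposlt]
      rw [htake, hdrop, hbefore, hafter]
      simp only [chooseLR, Option.some.injEq]
      split_ifs with hc1 hc2 hc2 <;> omega

theorem zip_enum_filter (gp : List (List Int)) (Z : List (Option Int × Option Int))
    (k : Int) (hlen : Z.length = gp.length) :
    (((PySem.List.enumerate (gp.zip Z) k).filter (fun p => p.2.1.isEmpty)).map (fun p => p.1)) = emIdx gp k := by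
  induction gp generalizing Z k with
  | nil => simp [emIdx]
  | cons lines rest ih =>
    cases Z with
    | nil => simp at hlen
    | cons z zr =>
      simp only [List.zip_cons_cons, PySem.List.enumerate_cons, List.filter_cons, emIdx]
      by_cases h : lines.isEmpty <;>
        simp [h, ih zr (k+1) (by simpa using hlen)]

theorem foldl_fst {β : Type} (FL : List (Int × β)) (g : List Int → Int → List Int) (init : List Int) :
    FL.foldl (fun acc p => g acc p.1) init = (FL.map (fun p => p.1)).foldl g init := by
  induction FL generalizing init with
  | nil => rfl
  | cons p t ih => simp [ih]

theorem main_eq (gp : List (List Int)) (SC : Int)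
    (hpre : (∃ l ∈ gp, l = ([] : List Int)) → (∃ l ∈ gp, l ≠ ([] : List Int))) :
    map_segments gp SC = map_segments_alt gp SC := by
  unfold map_segments map_segments_alt
  dsimp only
  rw [enum_filter_em gp 0, enum_filter_ne gp 0]
  set ne := neIdx gp 0 with hne_def
  set init := PySem.List.pyRange 0 SC 1 with hinit
  have hZlen : ((leftScan gp 0 none).zip (rightScan gp 0)).length = gp.length := by
    rw [List.length_zip, leftScan_length, rightScan_length, Nat.min_self]
  -- ne is nonempty as soon as some segment is nonempty
  have hne_ne : (∃ l ∈ gp, l ≠ ([] : List Int)) → ne ≠ [] := by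
    rintro ⟨l, hl, hlne⟩
    obtain ⟨j, hj, hgj⟩ := List.getElem_of_mem hl
    have : ((j:Int)) ∈ ne := by
      rw [hne_def, mem_neIdx]
      exact ⟨j, hj, by omega, by simp [hgj, List.isEmpty_iff, hlne]⟩
    exact fun h => by simp [h] at this
  -- rewrite B's fold into a fold over the empty indices
  rw [PySem.List.foldl_if_eq_foldl_filter (fun p => p.2.1.isEmpty)
      (fun acc (p : Int × (List Int × (Option Int × Option Int))) =>
        match chooseLR p.1 p.2.2.1 p.2.2.2 with
        | none => acc
        | some c => PySem.List.pySetD acc p.1 c)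
      (PySem.List.enumerate (gp.zip ((leftScan gp 0 none).zip (rightScan gp 0))) 0) init]
  rw [PySem.List.foldl_congr_mem
        ((PySem.List.enumerate (gp.zip ((leftScan gp 0 none).zip (rightScan gp 0))) 0).filter (fun p => p.2.1.isEmpty))
        _ (fun acc p => PySem.List.pySetD acc p.1 (take_closest ne p.1)) init ?_]
  · rw [foldl_fst _ (fun acc e => PySem.List.pySetD acc e (take_closest ne e)) init, zip_enum_filter gp ((leftScan gp 0 none).zip (rightScan gp 0)) 0 hZlen]
  · intro acc p hp
    obtain ⟨hpe, hpem⟩ := List.mem_filter.1 hp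
    obtain ⟨m, hm, hpeq⟩ := (PySem.List.mem_enumerate_iff _ _ _).1 hpe
    have hmgp : m < gp.length := by
      rw [List.length_zip, hZlen, Nat.min_self] at hm
      exact hm
    have hmL : m < (leftScan gp 0 none).length := by rw [leftScan_length]; exact hmgp
    have hmR : m < (rightScan gp 0).length := by rw [rightScan_length]; exact hmgp
    have hzip : (gp.zip ((leftScan gp 0 none).zip (rightScan gp 0)))[m]'hm = (gp[m]'hmgp, ((leftScan gp 0 none)[m]'hmL, (rightScan gp 0)[m]'hmR)) := by
      rw [List.getElem_zip, List.getElem_zip]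
    rw [hpeq, hzip]
    rw [hpeq, hzip] at hpem
    simp only at hpem
    -- gp[m] is empty
    have hem : gp[m]'hmgp = [] := by simpa [List.isEmpty_iff] using hpem
    have hne' : ne ≠ [] := hne_ne (hpre ⟨gp[m]'hmgp, List.getElem_mem hmgp, hem⟩)
    have hnm : (0 + (m:Int)) ∉ ne := by
      rw [hne_def, mem_neIdx]
      rintro ⟨j, hj, hje, hjne⟩
      have : j = m := by omega
      subst this
      exact hjne (by simp [hem])
    -- the scans at m
    have hlm : (leftScan gp 0 none)[m]'hmL =
        ((ne.filter (fun v => decide (v ≤ 0 + (m:Int)))).getLast?) := by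
      have := leftScan_getElem? gp 0 none m hmgp
      rw [List.getElem?_eq_getElem hmL] at this
      simpa [Option.or_none] using this
    have hrm : (rightScan gp 0)[m]'hmR =
        ((ne.filter (fun v => decide (0 + (m:Int) ≤ v))).head?) := by
      have := rightScan_getElem? gp 0 m hmgp
      rw [List.getElem?_eq_getElem hmR] at this
      simpa using this
    simp only [hlm, hrm]
    rw [take_closest_choose ne (0 + (m:Int)) (hne_def ▸ neIdx_pairwise gp 0) hnm hne']

-- ===== VERDICT (by name: the statement is the Claim_ definition above) =====
theorem map_segments_spec : Claim_equal_map_segments := by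
  intro gp SC _ hpre
  unfold Spec_map_segments
  exact main_eq gp SC hpre.1
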